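-- pv_equiv track=rewrite | github.com/Glebias/Support-System | lab3/karno.py | _group_to_implicant
-- ===== SOURCE A (Python) =====
-- def _group_to_implicant(group, bit_map, is_dnf):
--     tuples = [bit_map[cell] for cell in group]
--     n = 4
--     literals = []
--     for i in range(n):
--         bits = [t[i] for t in tuples]
--         if all(b == bits[0] for b in bits):
--             var = chr(ord('a') + i)
--             val = bits[0]
--             if is_dnf:
--                 lit = var if val == 1 else f"¬{var}"
--             else:
--                 lit = var if val == 0 else f"¬{var}"
--             literals.append(lit)
--     if not literals:
--         # Если группа «покрывает» все возможные комбинации => постоянная 1 (для ДНФ)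
--         # или постоянная 0 (для КНФ).
--         return ["1"] if is_dnf else ["0"]
--     if is_dnf:
--         return [" & ".join(literals)]
--     else:
--         return [" ∨ ".join(literals)]
-- ===== SOURCE B (Python) =====
-- def _group_to_implicant(group, bit_map, is_dnf):
--     # Set-intersection algorithm: each cell contributes its set of literal
--     # candidates {(position, value)}; intersecting these sets over the group
--     # leaves exactly the positions that are constant, with their common value.
--     common = None
--     for cell in group:
--         t = bit_map[cell]
--         cand = {(i, t[i]) for i in range(4)}
--         common = cand if common is None else common & cand
--     literals = []
--     for i, val in sorted(common):
--         var = chr(ord('a') + i)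
--         keep = (val == 1) if is_dnf else (val == 0)
--         literals.append(var if keep else '¬' + var)
--     if not literals:
--         return ['1'] if is_dnf else ['0']
--     return [' & '.join(literals)] if is_dnf else [' ∨ '.join(literals)]
-- ===== Notes on version B (the rewrite author's own statement) =====
-- stated objective: alternative
-- what changed: B replaces A's per-position column scans with a set-intersection algorithm: each cell is mapped to its set of (position, value) literal candidates, the sets are intersected over the group, and the surviving pairs (sorted by position) are rendered as literals.
import Mathlib
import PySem

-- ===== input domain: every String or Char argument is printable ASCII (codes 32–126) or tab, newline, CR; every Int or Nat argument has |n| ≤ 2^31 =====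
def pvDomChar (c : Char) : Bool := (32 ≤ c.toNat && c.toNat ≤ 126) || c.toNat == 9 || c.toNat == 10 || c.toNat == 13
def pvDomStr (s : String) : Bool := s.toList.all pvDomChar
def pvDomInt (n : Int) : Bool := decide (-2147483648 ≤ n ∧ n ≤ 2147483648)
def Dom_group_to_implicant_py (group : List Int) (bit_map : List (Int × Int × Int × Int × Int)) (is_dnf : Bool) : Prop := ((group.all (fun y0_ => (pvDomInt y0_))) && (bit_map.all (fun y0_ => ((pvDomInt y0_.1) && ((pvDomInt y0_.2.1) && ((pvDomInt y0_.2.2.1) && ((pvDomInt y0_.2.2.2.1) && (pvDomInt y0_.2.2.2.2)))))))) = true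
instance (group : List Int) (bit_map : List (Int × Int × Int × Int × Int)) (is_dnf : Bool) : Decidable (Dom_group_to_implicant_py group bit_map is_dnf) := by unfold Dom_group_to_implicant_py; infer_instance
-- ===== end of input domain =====

-- B replaces A's per-position column scans with a set-intersection algorithm over
-- (position, value) literal-candidate sets (objective: alternative, same cost class).

-- t[i] for a 4-tuple value, Python-style (only i = 0..3 is ever used by either program)
def pvTupGet (t : Int × Int × Int × Int) (i : Nat) : Int :=
  match i with
  | 0 => t.1
  | 1 => t.2.1
  | 2 => t.2.2.1
  | _ => t.2.2.2

-- bit_map[cell]: dict lookup; under Pre_ the key is always present, the default is never used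
def pvLook (bit_map : List (Int × Int × Int × Int × Int)) (c : Int) : Int × Int × Int × Int :=
  ((PySem.Dict.mk bit_map).get? c).getD (0, 0, 0, 0)

-- ===== PORT A =====
def group_to_implicant_py (group : List Int) (bit_map : List (Int × Int × Int × Int × Int)) (is_dnf : Bool) : List String :=
  let tuples := group.map (fun cell => pvLook bit_map cell)
  let literals := (List.range 4).foldl (fun (lits : List String) i =>
    let bits := tuples.map (fun t => pvTupGet t i)
    if bits.all (fun b => b == bits.headD 0) then
      let var := String.mk [Char.ofNat ('a'.toNat + i)]
      let val := bits.headD 0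
      let lit := if is_dnf then (if val == 1 then var else "¬" ++ var)
                 else (if val == 0 then var else "¬" ++ var)
      lits ++ [lit]
    else lits) []
  if literals = [] then (if is_dnf then ["1"] else ["0"])
  else if is_dnf then [PySem.Str.join " & " literals]
  else [PySem.Str.join " ∨ " literals]

-- ===== PORT B =====
-- {(i, t[i]) for i in range(4)}: the cell's literal-candidate set
def pvCellSet (t : Int × Int × Int × Int) : PySem.Set (Int × Int) :=
  PySem.Set.ofList [(0, t.1), (1, t.2.1), (2, t.2.2.1), (3, t.2.2.2)]

def group_to_implicant_py_alt (group : List Int) (bit_map : List (Int × Int × Int × Int × Int)) (is_dnf : Bool) : List String :=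
  let common := group.foldl (fun (acc : Option (PySem.Set (Int × Int))) cell =>
    let cand := pvCellSet (pvLook bit_map cell)
    match acc with
    | none => some cand
    | some s => some (PySem.Set.inter s cand)) none
  match common with
  | none => []   -- B's Python raises TypeError here (empty group); outside Pre_
  | some s =>
    -- sorted(common): pairs compare lexicographically; positions are 0..3, so .toNat is exact
    let literals := (PySem.List.sorted2 s Prod.fst Prod.snd).foldl (fun (lits : List String) p =>
      let var := String.mk [Char.ofNat ('a'.toNat + p.1.toNat)]
      let keep := if is_dnf then p.2 == 1 else p.2 == 0
      lits ++ [if keep then var else "¬" ++ var]) []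
    if literals = [] then (if is_dnf then ["1"] else ["0"])
    else if is_dnf then [PySem.Str.join " & " literals]
    else [PySem.Str.join " ∨ " literals]

-- ===== PRECONDITION & SPEC =====
-- Pre_ excludes the empty group (A raises IndexError at bits[0], B's Python raises TypeError)
-- and cells missing from bit_map (A and B both raise KeyError at bit_map[cell]).
def Pre_group_to_implicant_py (group : List Int) (bit_map : List (Int × Int × Int × Int × Int)) (is_dnf : Bool) : Prop :=
  group ≠ [] ∧ ∀ c ∈ group, c ∈ bit_map.map Prod.fst
instance (group : List Int) (bit_map : List (Int × Int × Int × Int × Int)) (is_dnf : Bool) : Decidable (Pre_group_to_implicant_py group bit_map is_dnf) := by unfold Pre_group_to_implicant_py; infer_instance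

def pvWitness_group_to_implicant_py : List Int × (List (Int × Int × Int × Int × Int)) × Bool :=
  ([0, 1], [(0, 0, 0, 1, 1), (1, 0, 1, 1, 1)], true)

def Spec_group_to_implicant_py (group : List Int) (bit_map : List (Int × Int × Int × Int × Int)) (is_dnf : Bool) (out : List String) : Prop := out = group_to_implicant_py_alt group bit_map is_dnf
instance (group : List Int) (bit_map : List (Int × Int × Int × Int × Int)) (is_dnf : Bool) (out : List String) : Decidable (Spec_group_to_implicant_py group bit_map is_dnf out) := by unfold Spec_group_to_implicant_py; infer_instance

-- ===== CLAIM (what is proved, stated in full; the proofs are below) =====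
def Claim_equal_group_to_implicant_py : Prop := ∀ (group : List Int) (bit_map : List (Int × Int × Int × Int × Int)) (is_dnf : Bool), Dom_group_to_implicant_py group bit_map is_dnf → Pre_group_to_implicant_py group bit_map is_dnf → Spec_group_to_implicant_py group bit_map is_dnf (group_to_implicant_py group bit_map is_dnf)

-- ===== LEMMAS AND PROOFS =====

-- once the Option accumulator is some, B's fold is an iterated set intersection
theorem alt_fold_some (bit_map : List (Int × Int × Int × Int × Int))
    (gs : List Int) (s : PySem.Set (Int × Int)) :
    gs.foldl (fun (acc : Option (PySem.Set (Int × Int))) cell =>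
      let cand := pvCellSet (pvLook bit_map cell)
      match acc with
      | none => some cand
      | some s => some (PySem.Set.inter s cand)) (some s)
    = some (gs.foldl (fun s c => PySem.Set.inter s (pvCellSet (pvLook bit_map c))) s) := by
  induction gs generalizing s with
  | nil => rfl
  | cons g gs ih => simp only [List.foldl_cons]; exact ih _

-- iterated intersection = one filter by membership in every later cell's set
theorem inter_foldl_filter (F : Int → PySem.Set (Int × Int)) (gs : List Int)
    (s : PySem.Set (Int × Int)) :
    gs.foldl (fun s c => PySem.Set.inter s (F c)) s
      = s.filter (fun p => gs.all (fun c => (F c).contains p)) := by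
  induction gs generalizing s with
  | nil => simp
  | cons g gs ih =>
    simp only [List.foldl_cons]
    rw [ih]
    simp only [PySem.Set.inter, List.filter_filter]
    exact List.filter_congr (fun p _ => by simp [Bool.and_comm])

-- the 4 candidate pairs have distinct first components, so set(…) is the plain list
theorem cellSet_eq_list (t : Int × Int × Int × Int) :
    pvCellSet t = [(0, t.1), (1, t.2.1), (2, t.2.2.1), (3, t.2.2.2)] := by
  simp [pvCellSet, PySem.Set.ofList_eq_foldl, PySem.Set.add, PySem.Set.contains,
    List.foldl_cons, List.contains_cons, Prod.ext_iff]

theorem contains_cellSet (t : Int × Int × Int × Int) (i : Nat) (h : i < 4) (v : Int) :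
    PySem.Set.contains (pvCellSet t) (((i : Nat) : Int), v) = (v == pvTupGet t i) := by
  rw [cellSet_eq_list]
  interval_cases i <;>
    (rw [Bool.eq_iff_iff]; simp [PySem.Set.contains, Prod.ext_iff, pvTupGet])

-- sorted with a lexicographic pair key leaves a list strictly increasing in the first key alone
theorem sorted2_eq_self (l : List (Int × Int))
    (h : l.Pairwise (fun a b => a.1 < b.1)) :
    PySem.List.sorted2 l Prod.fst Prod.snd = l := by
  suffices haux : ∀ (l : List (Int × Int)) (acc : List (Int × Int)),
      (acc ++ l).Pairwise (fun a b => a.1 < b.1) →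
      l.foldl (fun acc x => PySem.List.insertBy
        (fun a b => decide (a.1 < b.1) || !decide (b.1 < a.1) && decide (a.2 < b.2)) x acc) acc
        = acc ++ l by
    exact haux l [] h
  intro l
  induction l with
  | nil => intro acc _; simp
  | cons x xs ih =>
    intro acc hp
    simp only [List.foldl_cons]
    have hins : PySem.List.insertBy
        (fun a b => decide (a.1 < b.1) || !decide (b.1 < a.1) && decide (a.2 < b.2)) x acc
        = acc ++ [x] := by
      apply PySem.List.insertBy_of_forall_not_before
      intro y hy
      have : y.1 < x.1 := (List.pairwise_append.mp hp).2.2 y hy x (List.mem_cons_self ..)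
      simp only [Bool.or_eq_false_iff, Bool.and_eq_false_iff]
      constructor
      · simp; omega
      · left; simp; omega
    rw [hins, ih (acc ++ [x]) (by simpa using hp), List.append_assoc]
    rfl

-- ===== VERDICT (by name: the statement is the Claim_ definition above) =====
theorem group_to_implicant_py_spec : Claim_equal_group_to_implicant_py := by
  intro group bit_map is_dnf _ hpre
  unfold Spec_group_to_implicant_py
  obtain ⟨hne, -⟩ := hpre
  match group with
  | [] => exact absurd rfl hne
  | g :: gs =>
    unfold group_to_implicant_py group_to_implicant_py_alt
    simp only [List.map_cons, List.foldl_cons]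
    rw [alt_fold_some, inter_foldl_filter]
    rw [cellSet_eq_list]
    have hbase : [((0:Int), (pvLook bit_map g).1), (1, (pvLook bit_map g).2.1), (2, (pvLook bit_map g).2.2.1), (3, (pvLook bit_map g).2.2.2)]
        = (List.range 4).map (fun i => (((i : Nat) : Int), pvTupGet (pvLook bit_map g) i)) := rfl
    rw [hbase, List.filter_map]
    have hpair : (List.map (fun i => (((i : Nat) : Int), pvTupGet (pvLook bit_map g) i))
        (List.filter ((fun p => gs.all fun c => (pvCellSet (pvLook bit_map c)).contains p) ∘
          fun i => (((i : Nat) : Int), pvTupGet (pvLook bit_map g) i))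
          (List.range 4))).Pairwise (fun a b => a.1 < b.1) := by
      rw [List.pairwise_map]
      exact (List.Pairwise.filter _ List.pairwise_lt_range).imp (fun h => by simpa using h)
    have hcond : ∀ i ∈ List.range 4,
        ((pvTupGet (pvLook bit_map g) i ::
            List.map ((fun t => pvTupGet t i) ∘ fun cell => pvLook bit_map cell) gs).all
          fun b => b == (pvTupGet (pvLook bit_map g) i ::
            List.map ((fun t => pvTupGet t i) ∘ fun cell => pvLook bit_map cell) gs).headD 0)
        = ((fun p => gs.all fun c => (pvCellSet (pvLook bit_map c)).contains p) ∘
            fun i => (((i : Nat) : Int), pvTupGet (pvLook bit_map g) i)) i := by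
      intro i hi
      rw [List.mem_range] at hi
      simp only [Function.comp, List.headD_cons, List.all_cons, BEq.rfl, Bool.true_and,
        List.map_map, List.all_map, Function.comp, contains_cellSet _ i hi]
      apply congrArg
      funext c
      rw [Bool.eq_iff_iff]
      simp only [Function.comp_apply, beq_iff_eq]
      omega
    have hfold :
        List.foldl (fun (lits : List String) i =>
          if ((pvTupGet (pvLook bit_map g) i ::
              List.map (fun t => pvTupGet t i) (List.map (fun cell => pvLook bit_map cell) gs)).all
              fun b => b == (pvTupGet (pvLook bit_map g) i ::
                List.map (fun t => pvTupGet t i) (List.map (fun cell => pvLook bit_map cell) gs)).headD 0) = true then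
            lits ++ [if is_dnf = true then
                (if ((pvTupGet (pvLook bit_map g) i ::
                    List.map (fun t => pvTupGet t i) (List.map (fun cell => pvLook bit_map cell) gs)).headD 0 == 1) = true then
                  String.mk [Char.ofNat ('a'.toNat + i)]
                else "¬" ++ String.mk [Char.ofNat ('a'.toNat + i)])
              else
                (if ((pvTupGet (pvLook bit_map g) i ::
                    List.map (fun t => pvTupGet t i) (List.map (fun cell => pvLook bit_map cell) gs)).headD 0 == 0) = true then
                  String.mk [Char.ofNat ('a'.toNat + i)]
                else "¬" ++ String.mk [Char.ofNat ('a'.toNat + i)])]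
          else lits) [] (List.range 4)
        = List.foldl (fun (lits : List String) (p : Int × Int) =>
            lits ++ [if (if is_dnf = true then p.2 == 1 else p.2 == 0) = true then
                String.mk [Char.ofNat ('a'.toNat + p.1.toNat)]
              else "¬" ++ String.mk [Char.ofNat ('a'.toNat + p.1.toNat)]]) []
            (PySem.List.sorted2
              (List.map (fun i => (((i : Nat) : Int), pvTupGet (pvLook bit_map g) i))
                (List.filter ((fun p => gs.all fun c => (pvCellSet (pvLook bit_map c)).contains p) ∘
                  fun i => (((i : Nat) : Int), pvTupGet (pvLook bit_map g) i))
                  (List.range 4))) Prod.fst Prod.snd) := by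
      rw [sorted2_eq_self _ hpair]
      rw [PySem.List.foldl_append_singleton_eq_map]
      rw [PySem.List.foldl_append_if]
      simp only [List.nil_append, List.map_map]
      rw [List.filter_congr hcond]
      apply List.map_congr_left
      intro i hi
      simp only [Function.comp, List.headD_cons, Int.toNat_natCast]
      cases is_dnf <;> simp
    exact congrArg (fun L : List String => if L = [] then (if is_dnf then ["1"] else ["0"])
      else if is_dnf then [PySem.Str.join " & " L] else [PySem.Str.join " ∨ " L]) hfold
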